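-- pv_equiv track=rewrite | github.com/happysun7080/CodingTest | COS PRO/1급_1차_문제05_소용돌이_수.py | solution
-- ===== SOURCE A (Python) =====
-- def solution(n):
-- 	answer = 0
--
-- 	grid = [[0] * n for _ in range(n)]
-- 	spiral = n // 2
-- 	current = 1
-- 	current_size = n
--
-- 	for i in range(spiral):
-- 		answer += current
-- 		current += (n - 1) * 2
-- 		answer += current
--
-- 	return answer if n % 2 == 0 else answer + n ** 2
-- ===== SOURCE B (Python) =====
-- def solution(n):
--     s = max(n // 2, 0)
--     answer = 2 * s + 2 * (n - 1) * s * s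
--     return answer if n % 2 == 0 else answer + n * n
-- ===== Notes on version B (the rewrite author's own statement) =====
-- stated objective: faster
-- what changed: Replaces the linear summing loop (and the unused quadratic-size grid allocation) with the closed-form arithmetic-series value of the spiral sum, adding the centre square for odd n.
import Mathlib
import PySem

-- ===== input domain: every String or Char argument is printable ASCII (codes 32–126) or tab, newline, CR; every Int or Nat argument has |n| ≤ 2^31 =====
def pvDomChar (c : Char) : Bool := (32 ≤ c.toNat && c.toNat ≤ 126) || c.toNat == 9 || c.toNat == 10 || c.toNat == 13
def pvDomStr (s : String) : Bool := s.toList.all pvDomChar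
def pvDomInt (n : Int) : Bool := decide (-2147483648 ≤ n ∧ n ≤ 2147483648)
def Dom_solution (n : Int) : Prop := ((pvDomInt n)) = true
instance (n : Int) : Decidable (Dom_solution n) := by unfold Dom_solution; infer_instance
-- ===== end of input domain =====

-- B replaces A's O(n) loop (and its unused O(n^2) grid) by the closed-form arithmetic-series value.

-- ===== PORT A =====
def solution (n : Int) : Int :=
  let answer : Int := 0
  let _grid := (PySem.List.pyRange 0 n 1).map (fun _ => List.replicate n.toNat (0 : Int))
  let spiral := PySem.Int.floordiv n 2
  let current : Int := 1
  let _current_size := n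
  let st := (PySem.List.pyRange 0 spiral 1).foldl
    (fun (st : Int × Int) _ =>
      let answer := st.1 + st.2
      let current := st.2 + (n - 1) * 2
      (answer + current, current)) (answer, current)
  if PySem.Int.mod n 2 = 0 then st.1 else st.1 + n ^ 2

-- ===== PORT B =====
def solution_alt (n : Int) : Int :=
  let s := max (PySem.Int.floordiv n 2) 0
  let answer := 2 * s + 2 * (n - 1) * s * s
  if PySem.Int.mod n 2 = 0 then answer else answer + n * n

-- ===== PRECONDITION & SPEC =====
def Spec_solution (n : Int) (out : Int) : Prop := out = solution_alt n
instance (n : Int) (out : Int) : Decidable (Spec_solution n out) := by unfold Spec_solution; infer_instance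

-- ===== CLAIM (what is proved, stated in full; the proofs are below) =====
def Claim_equal_solution : Prop := ∀ (n : Int), Dom_solution n → Spec_solution n (solution n)

-- ===== LEMMAS AND PROOFS =====

lemma solution_loop (n : Int) (m : Nat) :
    (PySem.List.pyRange 0 (m : Int) 1).foldl
      (fun (st : Int × Int) _ =>
        let answer := st.1 + st.2
        let current := st.2 + (n - 1) * 2
        (answer + current, current)) ((0 : Int), (1 : Int))
    = (2 * m + 2 * (n - 1) * m * m, 1 + 2 * m * (n - 1)) := by
  induction m with
  | zero => simp [PySem.List.pyRange_one_eq_nil]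
  | succ k ih =>
    have h : PySem.List.pyRange 0 ((k : Int) + 1) 1
        = PySem.List.pyRange 0 (k : Int) 1 ++ [(k : Int)] :=
      PySem.List.pyRange_one_succ_right (by positivity)
    push_cast
    rw [h, List.foldl_append, ih]
    simp only [List.foldl, Prod.mk.injEq]
    constructor <;> push_cast <;> ring

theorem solution_spec : Claim_equal_solution := by
  intro n _
  simp only [Spec_solution, solution, solution_alt]
  have hs : PySem.Int.floordiv n 2 = ((PySem.Int.floordiv n 2).toNat : Int) ∨
      PySem.Int.floordiv n 2 < 0 := by omega
  rcases hs with h | h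
  · have hm : max (PySem.Int.floordiv n 2) 0 = ((PySem.Int.floordiv n 2).toNat : Int) := by omega
    rw [hm, h, solution_loop]
    simp only [Int.toNat_natCast]
    split <;> ring
  · rw [PySem.List.pyRange_one_eq_nil (by omega)]
    have : max (PySem.Int.floordiv n 2) 0 = 0 := by omega
    rw [this]
    simp
    split <;> ring
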